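-- pv_equiv track=rewrite | github.com/kyle0527/AIVA | scripts/generate_organization_diagrams.py | generate_functional_cohesion_diagram
-- ===== SOURCE A (Python) =====
-- def generate_functional_cohesion_diagram(cohesion_data):
--     """生成功能內聚聚類圖"""
--     mermaid = """graph TD
--     subgraph "功能內聚聚類分析"
--         direction TD
--
--         subgraph "安全功能聚類"
--             direction LR"""
--
--     # 安全功能
--     security_functions = [k for k in cohesion_data.keys() if 'authentication' in k or 'security' in k or 'vulnerability' in k]
--     for i, func in enumerate(security_functions[:3]):
--         if cohesion_data[func]:
--             count = len(cohesion_data[func])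
--             func_name = func.replace('_cohesion', '').replace('_', ' ').title()
--             mermaid += f"\n            S{i}[\"{func_name}<br/>({count})\"]"
--
--     mermaid += """
--         end
--
--         subgraph "數據處理聚類"
--             direction LR"""
--
--     # 數據處理功能
--     data_functions = [k for k in cohesion_data.keys() if 'data' in k or 'processing' in k or 'validation' in k]
--     for i, func in enumerate(data_functions[:3]):
--         if cohesion_data[func]:
--             count = len(cohesion_data[func])
--             func_name = func.replace('_cohesion', '').replace('_', ' ').title()
--             mermaid += f"\n            D{i}[\"{func_name}<br/>({count})\"]"
--
--     mermaid += """
--         end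
--
--         subgraph "系統功能聚類"
--             direction LR"""
--
--     # 系統功能
--     system_functions = [k for k in cohesion_data.keys() if 'configuration' in k or 'error' in k or 'resource' in k]
--     for i, func in enumerate(system_functions[:3]):
--         if cohesion_data[func]:
--             count = len(cohesion_data[func])
--             func_name = func.replace('_cohesion', '').replace('_', ' ').title()
--             mermaid += f"\n            Sys{i}[\"{func_name}<br/>({count})\"]"
--
--     mermaid += """
--         end
--     end
--
--     classDef security fill:#ffebee,stroke:#c62828,color:#000
--     classDef data fill:#e8f5e8,stroke:#2e7d32,color:#000
--     classDef system fill:#e3f2fd,stroke:#1565c0,color:#000"""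
--
--     return mermaid
-- ===== SOURCE B (Python) =====
-- _HEAD = 'graph TD\n    subgraph "\u529f\u80fd\u5167\u805a\u805a\u985e\u5206\u6790"\n        direction TD\n        \n        subgraph "\u5b89\u5168\u529f\u80fd\u805a\u985e"\n            direction LR'
-- _SEP1 = '\n        end\n        \n        subgraph "\u6578\u64da\u8655\u7406\u805a\u985e"\n            direction LR'
-- _SEP2 = '\n        end\n        \n        subgraph "\u7cfb\u7d71\u529f\u80fd\u805a\u985e"\n            direction LR'
-- _TAIL = ('\n        end\n    end\n    \n    classDef security fill:#ffebee,stroke:#c62828,color:#000'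
--          '\n    classDef data fill:#e8f5e8,stroke:#2e7d32,color:#000'
--          '\n    classDef system fill:#e3f2fd,stroke:#1565c0,color:#000')
--
-- _CLUSTERS = [("S", ("authentication", "security", "vulnerability")),
--              ("D", ("data", "processing", "validation")),
--              ("Sys", ("configuration", "error", "resource"))]
--
--
-- def generate_functional_cohesion_diagram(cohesion_data):
--     """生成功能內聚聚類圖 (single pass bucketing into the three clusters at once)"""
--     bufs = ["", "", ""]
--     counts = [0, 0, 0]
--     for key, members in cohesion_data.items():
--         for j, (prefix, words) in enumerate(_CLUSTERS):
--             if counts[j] < 3 and any(w in key for w in words):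
--                 if members:
--                     name = key.replace('_cohesion', '').replace('_', ' ').title()
--                     bufs[j] += f'\n            {prefix}{counts[j]}["{name}<br/>({len(members)})"]'
--                 counts[j] += 1
--     return _HEAD + bufs[0] + _SEP1 + bufs[1] + _SEP2 + bufs[2] + _TAIL
-- ===== Notes on version B (the rewrite author's own statement) =====
-- stated objective: alternative
-- what changed: Replaces A's three separate staged passes (filter the keys per cluster, slice, enumerate, append per block) by ONE pass over the dict items that buckets each key into all matching clusters simultaneously, maintaining a (buffer, counter) accumulator per cluster and splicing the three buffers between the fixed header/fence literals.
import Mathlib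
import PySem

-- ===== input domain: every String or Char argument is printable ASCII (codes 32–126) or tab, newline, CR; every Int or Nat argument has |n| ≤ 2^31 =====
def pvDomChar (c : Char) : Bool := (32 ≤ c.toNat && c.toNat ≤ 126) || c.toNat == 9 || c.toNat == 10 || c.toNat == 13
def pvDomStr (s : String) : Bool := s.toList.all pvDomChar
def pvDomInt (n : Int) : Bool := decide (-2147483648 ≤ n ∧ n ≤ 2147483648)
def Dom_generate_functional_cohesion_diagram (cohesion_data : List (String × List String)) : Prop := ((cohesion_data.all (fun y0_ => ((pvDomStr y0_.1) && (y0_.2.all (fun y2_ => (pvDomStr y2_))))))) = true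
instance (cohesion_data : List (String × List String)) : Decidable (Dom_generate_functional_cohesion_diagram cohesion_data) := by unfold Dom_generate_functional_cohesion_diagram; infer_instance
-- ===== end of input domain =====

-- B replaces A's three staged filter/enumerate passes by one pass over the dict items that
-- buckets into the three clusters simultaneously (objective: alternative; same cost).

-- ===== PORT A =====
-- Python str.title(), exact on ASCII input (a char is "cased" iff it is an ASCII letter there)
def pyTitle : List Char → Bool → List Char
  | [], _ => []
  | c :: rest, prev =>
    (if c.isAlpha then (if prev then c.toLower else c.toUpper) else c) :: pyTitle rest c.isAlpha

-- func.replace('_cohesion', '').replace('_', ' ').title()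
def fmtName (k : String) : String :=
  String.ofList (pyTitle (PySem.Str.replace (PySem.Str.replace k "_cohesion" "") "_" " ").toList false)

-- the f-string f"\n            {pre}{i}[\"{func_name}<br/>({count})\"]"
def nodeLine (pre : String) (i : Int) (k : String) (count : Int) : String :=
  "\n            " ++ pre ++ PySem.Int.toStr i ++ "[\"" ++ fmtName k ++ "<br/>(" ++
    PySem.Int.toStr count ++ ")\"]"

def generate_functional_cohesion_diagram (cohesion_data : List (String × List String)) : String :=
  let d := PySem.Dict.ofList cohesion_data
  let mermaid := "graph TD\n    subgraph \"功能內聚聚類分析\"\n        direction TD\n        \n        subgraph \"安全功能聚類\"\n            direction LR"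
  let security_functions := (PySem.Dict.keys d).filter
    (fun k => PySem.Str.isIn "authentication" k || PySem.Str.isIn "security" k || PySem.Str.isIn "vulnerability" k)
  let mermaid := (PySem.List.enumerate (security_functions.take 3)).foldl
    (fun m p => if !(PySem.Dict.getD d p.2 []).isEmpty then
        m ++ nodeLine "S" p.1 p.2 ((PySem.Dict.getD d p.2 []).length : Int) else m) mermaid
  let mermaid := mermaid ++ "\n        end\n        \n        subgraph \"數據處理聚類\"\n            direction LR"
  let data_functions := (PySem.Dict.keys d).filter
    (fun k => PySem.Str.isIn "data" k || PySem.Str.isIn "processing" k || PySem.Str.isIn "validation" k)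
  let mermaid := (PySem.List.enumerate (data_functions.take 3)).foldl
    (fun m p => if !(PySem.Dict.getD d p.2 []).isEmpty then
        m ++ nodeLine "D" p.1 p.2 ((PySem.Dict.getD d p.2 []).length : Int) else m) mermaid
  let mermaid := mermaid ++ "\n        end\n        \n        subgraph \"系統功能聚類\"\n            direction LR"
  let system_functions := (PySem.Dict.keys d).filter
    (fun k => PySem.Str.isIn "configuration" k || PySem.Str.isIn "error" k || PySem.Str.isIn "resource" k)
  let mermaid := (PySem.List.enumerate (system_functions.take 3)).foldl
    (fun m p => if !(PySem.Dict.getD d p.2 []).isEmpty then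
        m ++ nodeLine "Sys" p.1 p.2 ((PySem.Dict.getD d p.2 []).length : Int) else m) mermaid
  mermaid ++ "\n        end\n    end\n    \n    classDef security fill:#ffebee,stroke:#c62828,color:#000\n    classDef data fill:#e8f5e8,stroke:#2e7d32,color:#000\n    classDef system fill:#e3f2fd,stroke:#1565c0,color:#000"

-- ===== PORT B =====
-- one inner-loop iteration of Source B: update one cluster's (buffer, counter) pair with one item
def updCluster (pre : String) (words : List String) (kv : String × List String)
    (s : String × Int) : String × Int :=
  if decide (s.2 < 3) && words.any (fun w => PySem.Str.isIn w kv.1) then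
    ((if !kv.2.isEmpty then
        s.1 ++ nodeLine pre s.2 kv.1 (kv.2.length : Int) else s.1), s.2 + 1)
  else s

def generate_functional_cohesion_diagram_alt (cohesion_data : List (String × List String)) : String :=
  let d := PySem.Dict.ofList cohesion_data
  -- single pass: the inner loop over the constant 3-entry cluster table is written out
  let r := (PySem.Dict.items d).foldl
    (fun s kv => (updCluster "S" ["authentication", "security", "vulnerability"] kv s.1,
                  updCluster "D" ["data", "processing", "validation"] kv s.2.1,
                  updCluster "Sys" ["configuration", "error", "resource"] kv s.2.2))
    (("", 0), ("", 0), ("", 0))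
  "graph TD\n    subgraph \"功能內聚聚類分析\"\n        direction TD\n        \n        subgraph \"安全功能聚類\"\n            direction LR"
    ++ r.1.1
    ++ "\n        end\n        \n        subgraph \"數據處理聚類\"\n            direction LR"
    ++ r.2.1.1
    ++ "\n        end\n        \n        subgraph \"系統功能聚類\"\n            direction LR"
    ++ r.2.2.1
    ++ "\n        end\n    end\n    \n    classDef security fill:#ffebee,stroke:#c62828,color:#000\n    classDef data fill:#e8f5e8,stroke:#2e7d32,color:#000\n    classDef system fill:#e3f2fd,stroke:#1565c0,color:#000"

-- ===== PRECONDITION & SPEC =====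
def Spec_generate_functional_cohesion_diagram (cohesion_data : List (String × List String)) (out : String) : Prop := out = generate_functional_cohesion_diagram_alt cohesion_data
instance (cohesion_data : List (String × List String)) (out : String) : Decidable (Spec_generate_functional_cohesion_diagram cohesion_data out) := by unfold Spec_generate_functional_cohesion_diagram; infer_instance

-- ===== CLAIM =====
def Claim_equal_generate_functional_cohesion_diagram : Prop := ∀ (cohesion_data : List (String × List String)), Dom_generate_functional_cohesion_diagram cohesion_data → Spec_generate_functional_cohesion_diagram cohesion_data (generate_functional_cohesion_diagram cohesion_data)

-- ===== LEMMAS AND PROOFS =====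
theorem join_cons (a : String) (l : List String) : String.join (a :: l) = a ++ String.join l := by
  simp [String.join_eq]

theorem foldl_if_append_join {α : Type} (l : List α) (c : α → Bool) (f : α → String) (m : String) :
    l.foldl (fun m x => if c x then m ++ f x else m) m = m ++ String.join ((l.filter c).map f) := by
  induction l generalizing m with
  | nil => simp [String.join_eq]
  | cons a t ih =>
    by_cases h : c a <;>
      simp [h, ih, join_cons, String.append_assoc]

theorem enumerate_map {α β : Type} (l : List α) (φ : α → β) (s : Int) :
    PySem.List.enumerate (l.map φ) s = (PySem.List.enumerate l s).map (fun p => (p.1, φ p.2)) := by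
  induction l generalizing s with
  | nil => simp [PySem.List.enumerate_nil]
  | cons a t ih => simp [PySem.List.enumerate_cons, ih]

-- the string one A-block / one B-bucket produces from the first 3 matching items
def emitStr (pre : String) (l : List (Int × String × List String)) : String :=
  String.join ((l.filter (fun p => !p.2.2.isEmpty)).map
    (fun p => nodeLine pre p.1 p.2.1 (p.2.2.length : Int)))

-- A's hand-written block for one cluster equals the emitStr of the first 3 matching items
theorem block_eq (d : PySem.Dict String (List String)) (hnd : (PySem.Dict.keys d).Nodup)
    (pred : String → Bool) (pre m : String) :
    (PySem.List.enumerate (((PySem.Dict.keys d).filter pred).take 3)).foldl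
      (fun m p => if !(PySem.Dict.getD d p.2 []).isEmpty then
          m ++ nodeLine pre p.1 p.2 ((PySem.Dict.getD d p.2 []).length : Int) else m) m
    = m ++ emitStr pre
        (PySem.List.enumerate (((PySem.Dict.items d).filter (fun kv => pred kv.1)).take 3)) := by
  rw [PySem.Dict.items_eq_map_keys d hnd []]
  rw [foldl_if_append_join]
  unfold emitStr
  congr 1
  congr 1
  rw [List.filter_map, show ((fun kv : String × List String => pred kv.1) ∘
        (fun k => (k, PySem.Dict.getD d k []))) = pred from rfl]
  rw [← List.map_take, enumerate_map, List.filter_map, List.map_map]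
  rfl

-- B's counting fold for one cluster equals the emitStr of the first (3 - c) matching items
theorem updCluster_foldl (pre : String) (words : List String)
    (l : List (String × List String)) (b : String) (c : Int) (h : 0 ≤ c) :
    (l.foldl (fun s kv => updCluster pre words kv s) (b, c)).1
    = b ++ emitStr pre (PySem.List.enumerate
        ((l.filter (fun kv => words.any (fun w => PySem.Str.isIn w kv.1))).take (3 - c).toNat) c) := by
  induction l generalizing b c with
  | nil => simp [emitStr, PySem.List.enumerate_nil, String.join_eq]
  | cons a t ih =>
    rw [List.foldl_cons]
    by_cases hp : (words.any (fun w => PySem.Str.isIn w a.1)) = true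
    · by_cases hc : c < 3
      · rw [show updCluster pre words a (b, c)
            = ((if !a.2.isEmpty then b ++ nodeLine pre c a.1 (a.2.length : Int) else b), c + 1)
            from by unfold updCluster; rw [decide_eq_true hc, hp]; rfl]
        rw [ih _ _ (by omega)]
        have h3 : (3 - c).toNat = (3 - (c + 1)).toNat + 1 := by omega
        simp only [List.filter_cons, hp, if_true, h3, List.take_succ_cons,
          PySem.List.enumerate_cons]
        unfold emitStr
        by_cases he : a.2.isEmpty
        · simp [he]
        · simp [he, join_cons, String.append_assoc]
      · rw [show updCluster pre words a (b, c) = (b, c)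
            from by unfold updCluster; rw [decide_eq_false hc]; rfl]
        rw [ih _ _ h]
        have h0 : (3 - c).toNat = 0 := by omega
        simp [h0]
    · rw [Bool.not_eq_true] at hp
      rw [show updCluster pre words a (b, c) = (b, c)
            from by unfold updCluster; rw [hp, Bool.and_false]; rfl]
      rw [ih _ _ h]
      have hfa : ¬ ((fun kv : String × List String =>
          words.any (fun w => PySem.Str.isIn w kv.1)) a = true) := by
        show ¬ ((words.any fun w => PySem.Str.isIn w a.1) = true)
        rw [hp]; simp
      have hfil : List.filter (fun kv => words.any (fun w => PySem.Str.isIn w kv.1)) (a :: t)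
          = List.filter (fun kv => words.any (fun w => PySem.Str.isIn w kv.1)) t :=
        List.filter_cons_of_neg hfa
      rw [hfil]

-- the componentwise triple fold splits into three independent folds
theorem foldl_prod3 {α σ₁ σ₂ σ₃ : Type} (f₁ : α → σ₁ → σ₁) (f₂ : α → σ₂ → σ₂) (f₃ : α → σ₃ → σ₃)
    (l : List α) (s₁ : σ₁) (s₂ : σ₂) (s₃ : σ₃) :
    l.foldl (fun s a => (f₁ a s.1, f₂ a s.2.1, f₃ a s.2.2)) (s₁, s₂, s₃)
    = (l.foldl (fun s a => f₁ a s) s₁, l.foldl (fun s a => f₂ a s) s₂,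
       l.foldl (fun s a => f₃ a s) s₃) := by
  induction l generalizing s₁ s₂ s₃ with
  | nil => rfl
  | cons a t ih => simp [List.foldl_cons, ih]

-- ===== VERDICT =====
set_option maxRecDepth 40000 in
theorem generate_functional_cohesion_diagram_spec : Claim_equal_generate_functional_cohesion_diagram := by
  intro cd _
  unfold Spec_generate_functional_cohesion_diagram
  unfold generate_functional_cohesion_diagram generate_functional_cohesion_diagram_alt
  have hnd := PySem.Dict.nodup_keys_ofList (ps := cd)
  dsimp only []
  rw [block_eq _ hnd _ "S", block_eq _ hnd _ "D", block_eq _ hnd _ "Sys",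
      foldl_prod3, updCluster_foldl _ _ _ _ _ (by norm_num),
      updCluster_foldl _ _ _ _ _ (by norm_num), updCluster_foldl _ _ _ _ _ (by norm_num)]
  simp only [List.any_cons, List.any_nil, Bool.or_false, Bool.or_assoc]
  norm_num
  simp [String.append_assoc]
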